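-- pv_equiv track=rewrite | github.com/inthebits/gelatinous | world/medical/wounds/longdesc_integration.py | _group_wounds_by_location
-- ===== SOURCE A (Python) =====
-- def _group_wounds_by_location(wounds):
--     """
--     Group wounds by body location for compound descriptions.
--
--     Args:
--         wounds (list): List of wound data dictionaries
--
--     Returns:
--         dict: Wounds grouped by location
--     """
--     grouped = {}
--     for wound in wounds:
--         location = wound['location']
--         if location not in grouped:
--             grouped[location] = []
--         grouped[location].append(wound)
--
--     return grouped
-- ===== SOURCE B (Python) =====
-- def _group_wounds_by_location(wounds):
--     """
--     Group wounds by body location for compound descriptions.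
--
--     B: two-phase — compute the first-occurrence order of locations with
--     dict.fromkeys, then build each group with one filter pass per location,
--     instead of A's single pass that appends into a growing dict.
--     """
--     order = list(dict.fromkeys(w['location'] for w in wounds))
--     return {loc: [w for w in wounds if w['location'] == loc] for loc in order}
-- ===== Notes on version B (the rewrite author's own statement) =====
-- stated objective: idiomatic
-- what changed: B first computes the first-occurrence order of locations via dict.fromkeys and then builds each group with a per-location filter comprehension, instead of A's single pass that mutates a dict of growing lists; Pre_ only excludes wounds missing the 'location' key, on which both versions raise KeyError.
import Mathlib
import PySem

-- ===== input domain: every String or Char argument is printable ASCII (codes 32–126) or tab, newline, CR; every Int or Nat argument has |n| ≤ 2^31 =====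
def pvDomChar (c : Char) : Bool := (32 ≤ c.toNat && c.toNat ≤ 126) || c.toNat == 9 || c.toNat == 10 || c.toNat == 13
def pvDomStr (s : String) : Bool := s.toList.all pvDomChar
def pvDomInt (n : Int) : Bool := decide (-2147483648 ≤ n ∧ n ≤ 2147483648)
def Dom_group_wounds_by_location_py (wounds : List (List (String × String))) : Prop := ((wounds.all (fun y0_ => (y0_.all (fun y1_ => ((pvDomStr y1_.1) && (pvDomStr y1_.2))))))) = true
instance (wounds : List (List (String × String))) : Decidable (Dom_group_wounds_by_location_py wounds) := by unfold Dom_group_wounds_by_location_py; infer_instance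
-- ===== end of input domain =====

-- B groups by first computing the first-occurrence order of locations and then
-- filtering the list once per location, instead of A's single mutating-dict pass;
-- same result, different structure (objective: idiomatic).

-- wound['location'] for a wound given as an association list (first match, as for a
-- Python dict); the "" default is never reached under Pre_ (Python raises KeyError there).
def pvLoc (w : List (String × String)) : String :=
  ((w.find? (fun p => p.1 == "location")).map (·.2)).getD ""

-- ===== PORT A =====
def group_wounds_by_location_py (wounds : List (List (String × String))) : List (String × List (List (String × String))) :=
  (wounds.foldl (fun grouped wound =>
      let location := pvLoc wound
      let grouped := if grouped.contains location then grouped else grouped.insert location []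
      -- grouped[location].append(wound): in-place update of the stored list
      grouped.insert location (grouped.getD location [] ++ [wound]))
    PySem.Dict.empty).items

-- ===== PORT B =====
def group_wounds_by_location_py_alt (wounds : List (List (String × String))) : List (String × List (List (String × String))) :=
  (PySem.List.dedup (wounds.map pvLoc)).map
    (fun loc => (loc, wounds.filter (fun w => pvLoc w == loc)))

-- ===== PRECONDITION & SPEC =====
-- Pre_ excludes exactly the inputs where some wound lacks the 'location' key: there
-- Python A (and Python B) raise KeyError and return nothing.
def Pre_group_wounds_by_location_py (wounds : List (List (String × String))) : Prop :=
  ∀ w ∈ wounds, "location" ∈ w.map (·.1)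
instance (wounds : List (List (String × String))) : Decidable (Pre_group_wounds_by_location_py wounds) := by unfold Pre_group_wounds_by_location_py; infer_instance
def pvWitness_group_wounds_by_location_py : (List (List (String × String))) :=
  ([[("location", "arm"), ("severity", "3")], [("location", "leg")], [("location", "arm")]])
def Spec_group_wounds_by_location_py (wounds : List (List (String × String))) (out : List (String × List (List (String × String)))) : Prop := out = group_wounds_by_location_py_alt wounds
instance (wounds : List (List (String × String))) (out : List (String × List (List (String × String)))) : Decidable (Spec_group_wounds_by_location_py wounds out) := by unfold Spec_group_wounds_by_location_py; infer_instance

-- ===== CLAIM (what is proved, stated in full; the proofs are below) =====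
def Claim_equal_group_wounds_by_location_py : Prop := ∀ (wounds : List (List (String × String))), Dom_group_wounds_by_location_py wounds → Pre_group_wounds_by_location_py wounds → Spec_group_wounds_by_location_py wounds (group_wounds_by_location_py wounds)

-- ===== LEMMAS AND PROOFS =====

-- A's loop body equals a plain 'modify location [] (· ++ [wound])' step.
theorem pv_stepA_eq_modify (g : PySem.Dict String (List (List (String × String))))
    (w : List (String × String)) :
    (let location := pvLoc w
     let g' := if g.contains location then g else g.insert location []
     g'.insert location (g'.getD location [] ++ [w]))
    = g.modify (pvLoc w) [] (· ++ [w]) := by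
  by_cases h : g.contains (pvLoc w) = true
  · simp [h, PySem.Dict.modify, PySem.Dict.getD_eq_get?_getD]
  · simp only [Bool.not_eq_true] at h
    simp [h, PySem.Dict.modify, PySem.Dict.insert_insert_self,
      PySem.Dict.getD_insert_self, PySem.Dict.getD_of_not_contains]

-- ===== VERDICT (by name: the statement is the Claim_ definition above) =====
theorem group_wounds_by_location_py_spec : Claim_equal_group_wounds_by_location_py := by
  intro wounds _ _
  show group_wounds_by_location_py wounds = group_wounds_by_location_py_alt wounds
  unfold group_wounds_by_location_py group_wounds_by_location_py_alt
  have hstep : (wounds.foldl (fun grouped wound =>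
      let location := pvLoc wound
      let grouped := if grouped.contains location then grouped else grouped.insert location []
      grouped.insert location (grouped.getD location [] ++ [wound])) PySem.Dict.empty)
      = (wounds.map (fun w => (pvLoc w, w))).foldl
          (fun (d : PySem.Dict String (List (List (String × String))))
               (p : String × List (String × String)) => d.modify p.1 [] (· ++ [p.2]))
          PySem.Dict.empty := by
    rw [List.foldl_map]
    have hfun : (fun grouped wound =>
        let location := pvLoc wound
        let grouped := if grouped.contains location then grouped else grouped.insert location []
        grouped.insert location (grouped.getD location [] ++ [wound]))
        = (fun (d : PySem.Dict String (List (List (String × String))))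
               (w : List (String × String)) => d.modify (pvLoc w) [] (· ++ [w])) :=
      funext fun g => funext fun w => pv_stepA_eq_modify g w
    rw [hfun]
  rw [hstep]
  set d := (wounds.map (fun w => (pvLoc w, w))).foldl
      (fun (d : PySem.Dict String (List (List (String × String))))
           (p : String × List (String × String)) => d.modify p.1 [] (· ++ [p.2]))
      PySem.Dict.empty with hd
  have hkeys : d.keys = PySem.List.dedup (wounds.map pvLoc) := by
    rw [hd]
    simp only [PySem.Dict.keys_foldl_modify_key]
    simp only [PySem.Dict.keys_empty, PySem.Set.update_nil_left, List.map_map,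
      PySem.List.dedup_eq_ofList]
    rfl
  have hnd : d.keys.Nodup := by
    rw [hkeys]
    exact PySem.List.nodup_dedup _
  have hget : ∀ k, d.getD k [] = wounds.filter (fun w => pvLoc w == k) := by
    intro k
    rw [hd, PySem.Dict.getD_foldl_modify_append, PySem.Dict.getD_empty, List.filter_map]
    have hc : ((fun x : String × List (String × String) => x.2) ∘ fun w => (pvLoc w, w)) = id := rfl
    simp only [List.nil_append, List.map_map]
    rw [hc, List.map_id]
    rfl
  rw [PySem.Dict.items_eq_map_keys d hnd [], hkeys]
  exact List.map_congr_left (fun k _ => by rw [hget k])
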